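-- pv_equiv track=rewrite | github.com/ruslanlap/Flow-Launcher-Themes-Collection | update_themes.py | _extract_first_meaningful_line
-- ===== SOURCE A (Python) =====
-- from typing import List, Dict, Optional, Set
--
-- def _extract_first_meaningful_line(body_text: str, lines: List[str]) -> Optional[str]:
--     """Extract first meaningful line"""
--     for line in lines:
--         clean_line = line.strip()
--         if (clean_line and
--             ".xaml" not in clean_line.lower() and
--             len(clean_line.split()) >= 2 and
--             not clean_line.startswith('http') and
--             not clean_line.startswith('[')):
--             return clean_line
--
--     # Fallback to first non-empty line
--     for line in lines:
--         if line.strip():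
--             return line.strip()
--
--     return None
-- ===== SOURCE B (Python) =====
-- from typing import List, Optional
--
-- def _extract_first_meaningful_line(body_text: str, lines: List[str]) -> Optional[str]:
--     """Single pass: return first meaningful line, remembering the first non-empty line as fallback."""
--     fallback = None
--     for line in lines:
--         clean = line.strip()
--         if not clean:
--             continue
--         if (".xaml" not in clean.lower()
--                 and len(clean.split()) >= 2
--                 and not clean.startswith('http')
--                 and not clean.startswith('[')):
--             return clean
--         if fallback is None:
--             fallback = clean
--     return fallback
-- ===== Notes on version B (the rewrite author's own statement) =====
-- stated objective: alternative
-- what changed: B makes a single pass over the lines, remembering the first non-empty stripped line as a fallback accumulator, instead of A's two separate passes (meaningful scan, then non-empty scan).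
import Mathlib
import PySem

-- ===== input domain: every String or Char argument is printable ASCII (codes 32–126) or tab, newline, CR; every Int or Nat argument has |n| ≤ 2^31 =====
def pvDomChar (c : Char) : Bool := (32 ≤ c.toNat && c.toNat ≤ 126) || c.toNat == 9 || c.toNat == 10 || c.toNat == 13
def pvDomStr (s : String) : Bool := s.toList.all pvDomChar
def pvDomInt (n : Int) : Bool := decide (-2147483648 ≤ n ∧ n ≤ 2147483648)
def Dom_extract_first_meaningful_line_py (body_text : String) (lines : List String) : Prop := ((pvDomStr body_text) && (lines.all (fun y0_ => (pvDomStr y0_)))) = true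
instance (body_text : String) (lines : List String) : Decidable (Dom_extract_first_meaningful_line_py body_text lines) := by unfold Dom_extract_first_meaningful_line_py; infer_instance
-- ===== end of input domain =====

-- B changes A's two passes into one pass with a fallback accumulator (objective: alternative decomposition).

-- ===== PORT A =====
-- the meaningful-line test shared verbatim by both Pythons (everything after the truthiness check)
def pvMeanRest (clean : String) : Bool :=
  !(PySem.Str.isIn ".xaml" (PySem.Str.lower clean)) &&
  decide (2 ≤ (PySem.Str.split₀ clean).length) &&
  !(PySem.Str.startswith clean "http") &&
  !(PySem.Str.startswith clean "[")

-- A's first loop: return the first meaningful stripped line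
def pvLoopA1 : List String → Option String
  | [] => none
  | line :: rest =>
      let clean := PySem.Str.strip line
      if decide (clean ≠ "") && pvMeanRest clean then some clean else pvLoopA1 rest

-- A's second loop: fallback to the first non-empty stripped line
def pvLoopA2 : List String → Option String
  | [] => none
  | line :: rest =>
      if PySem.Str.strip line ≠ "" then some (PySem.Str.strip line) else pvLoopA2 rest

def extract_first_meaningful_line_py (body_text : String) (lines : List String) : Option String :=
  (pvLoopA1 lines).orElse (fun _ => pvLoopA2 lines)

-- ===== PORT B =====
-- B's single loop, carrying the fallback accumulator
def pvLoopB : List String → Option String → Option String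
  | [], fallback => fallback
  | line :: rest, fallback =>
      let clean := PySem.Str.strip line
      if clean = "" then pvLoopB rest fallback
      else if pvMeanRest clean then some clean
      else pvLoopB rest (if fallback = none then some clean else fallback)

def extract_first_meaningful_line_py_alt (body_text : String) (lines : List String) : Option String :=
  pvLoopB lines none

-- ===== PRECONDITION & SPEC =====
def Spec_extract_first_meaningful_line_py (body_text : String) (lines : List String) (out : Option String) : Prop := out = extract_first_meaningful_line_py_alt body_text lines
instance (body_text : String) (lines : List String) (out : Option String) : Decidable (Spec_extract_first_meaningful_line_py body_text lines out) := by unfold Spec_extract_first_meaningful_line_py; infer_instance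

-- ===== CLAIM (what is proved, stated in full; the proofs are below) =====
def Claim_equal_extract_first_meaningful_line_py : Prop := ∀ (body_text : String) (lines : List String), Dom_extract_first_meaningful_line_py body_text lines → Spec_extract_first_meaningful_line_py body_text lines (extract_first_meaningful_line_py body_text lines)

-- ===== LEMMAS AND PROOFS =====
theorem pvLoopB_eq (lines : List String) : ∀ (fb : Option String),
    pvLoopB lines fb = (pvLoopA1 lines).orElse (fun _ => fb.orElse (fun _ => pvLoopA2 lines)) := by
  induction lines with
  | nil => intro fb; cases fb <;> simp [pvLoopB, pvLoopA1, pvLoopA2, Option.orElse]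
  | cons line rest ih =>
    intro fb
    by_cases h : PySem.Str.strip line = ""
    · simp [pvLoopB, pvLoopA1, pvLoopA2, h, ih]
    · by_cases hm : pvMeanRest (PySem.Str.strip line) = true
      · simp [pvLoopB, pvLoopA1, h, hm, Option.orElse]
      · rw [show pvLoopB (line :: rest) fb
              = pvLoopB rest (if fb = none then some (PySem.Str.strip line) else fb) by
              simp [pvLoopB, h, hm]]
        rw [ih]
        have hA1 : pvLoopA1 (line :: rest) = pvLoopA1 rest := by
          simp [pvLoopA1, h, hm]
        have hA2 : pvLoopA2 (line :: rest) = some (PySem.Str.strip line) := by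
          simp [pvLoopA2, h]
        rw [hA1, hA2]
        cases fb <;> simp [Option.orElse]

-- ===== VERDICT (by name: the statement is the Claim_ definition above) =====
theorem extract_first_meaningful_line_py_spec : Claim_equal_extract_first_meaningful_line_py := by
  intro body_text lines _
  unfold Spec_extract_first_meaningful_line_py extract_first_meaningful_line_py extract_first_meaningful_line_py_alt
  rw [pvLoopB_eq]
  cases pvLoopA1 lines <;> simp [Option.orElse]
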